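-- pv_equiv track=rewrite | github.com/Cepa95/GraphAlgorithms | task03/exercise03.py | checkMatrixColumns
-- ===== SOURCE A (Python) =====
-- def checkMatrixColumns(matrix):
--     numRows = len(matrix)
--     numCols = max(len(row) for row in matrix)
--
--     for i in range(numCols):
--         counter = 0
--         for j in range(numRows):
--             if i < len(matrix[j]):
--
--                 if matrix[j][i] == 1:
--                     counter += 1
--                 elif matrix[j][i] != 0:
--                     return False
--
--         if counter != 2:
--             return False
--     return True
-- ===== SOURCE B (Python) =====
-- def checkMatrixColumns(matrix):
--     numCols = max(len(row) for row in matrix)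
--     counts = [0] * numCols
--     for row in matrix:
--         for i, v in enumerate(row):
--             if v != 0 and v != 1:
--                 return False
--             counts[i] += v
--     return all(c == 2 for c in counts)
-- ===== Notes on version B (the rewrite author's own statement) =====
-- stated objective: alternative
-- what changed: Replaces the column-major double loop (an indexed bounds-tested scan of every row once per column) by a single row-major enumerate pass maintaining a per-column count table, followed by a separate validation sweep over the counts; A's and B's early exits trigger at different points but the returned Bool is the same.
import Mathlib
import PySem

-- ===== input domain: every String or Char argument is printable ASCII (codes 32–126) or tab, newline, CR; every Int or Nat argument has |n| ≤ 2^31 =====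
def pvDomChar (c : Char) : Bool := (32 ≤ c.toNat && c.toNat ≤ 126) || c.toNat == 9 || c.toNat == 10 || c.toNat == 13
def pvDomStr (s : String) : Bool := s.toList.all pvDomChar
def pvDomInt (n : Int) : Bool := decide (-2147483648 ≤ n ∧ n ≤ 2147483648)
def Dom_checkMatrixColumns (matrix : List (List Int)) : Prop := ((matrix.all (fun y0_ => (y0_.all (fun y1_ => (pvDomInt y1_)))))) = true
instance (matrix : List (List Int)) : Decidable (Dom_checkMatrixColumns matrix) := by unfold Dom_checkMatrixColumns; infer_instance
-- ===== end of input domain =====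

-- B replaces A's column-major double loop by one row-major counting pass plus a
-- separate validation sweep over a per-column count table (objective: alternative).

-- ===== PORT A =====
-- inner 'for j in range(numRows)' loop of A for a fixed column i:
-- none = the 'return False' on a value other than 0/1, some c = the final counter.
def aScanCol (matrix : List (List Int)) (i : Nat) : Option Int :=
  match matrix with
  | [] => some 0
  | row :: rest =>
    if h : i < row.length then
      if row[i] = 1 then (aScanCol rest i).map (· + 1)
      else if row[i] ≠ 0 then none
      else aScanCol rest i
    else aScanCol rest i

-- outer 'for i in range(numCols)' loop of A: n columns remaining, current column i.
def aOuter (matrix : List (List Int)) (i n : Nat) : Bool :=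
  match n with
  | 0 => true
  | n + 1 =>
    match aScanCol matrix i with
    | none => false
    | some c => if c ≠ 2 then false else aOuter matrix (i + 1) n

def checkMatrixColumns (matrix : List (List Int)) : Bool :=
  let numCols := (matrix.map List.length).max?.getD 0
  aOuter matrix 0 numCols

-- ===== PORT B =====
-- 'for i, v in enumerate(row)': walk row and counts in step;
-- none = the 'return False' on a value other than 0/1.
def bRow (counts row : List Int) : Option (List Int) :=
  match row with
  | [] => some counts
  | v :: vs =>
    if v ≠ 0 ∧ v ≠ 1 then none
    else
      match counts with
      | c :: cs => (bRow cs vs).map (fun t => (c + v) :: t)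
      | [] => none   -- counts[i] IndexError; unreachable since numCols = max row length

-- 'for row in matrix' over the count table
def bAll (matrix : List (List Int)) (counts : List Int) : Option (List Int) :=
  match matrix with
  | [] => some counts
  | row :: rest => (bRow counts row).bind (bAll rest)

def checkMatrixColumns_alt (matrix : List (List Int)) : Bool :=
  let numCols := (matrix.map List.length).max?.getD 0
  match bAll matrix (List.replicate numCols 0) with
  | none => false
  | some counts => counts.all (fun c => c == 2)

-- ===== PRECONDITION & SPEC =====
-- Pre_ excludes only the empty matrix, on which A's max() raises ValueError (B's does too).
def Pre_checkMatrixColumns (matrix : List (List Int)) : Prop := matrix ≠ []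
instance (matrix : List (List Int)) : Decidable (Pre_checkMatrixColumns matrix) := by unfold Pre_checkMatrixColumns; infer_instance
def pvWitness_checkMatrixColumns : List (List Int) := [[1, 0], [1, 1], [0, 1]]

def Spec_checkMatrixColumns (matrix : List (List Int)) (out : Bool) : Prop := out = checkMatrixColumns_alt matrix
instance (matrix : List (List Int)) (out : Bool) : Decidable (Spec_checkMatrixColumns matrix out) := by unfold Spec_checkMatrixColumns; infer_instance

-- ===== CLAIM (what is proved, stated in full; the proofs are below) =====
def Claim_equal_checkMatrixColumns : Prop := ∀ (matrix : List (List Int)), Dom_checkMatrixColumns matrix → Pre_checkMatrixColumns matrix → Spec_checkMatrixColumns matrix (checkMatrixColumns matrix)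

-- ===== LEMMAS AND PROOFS =====

-- the sum of column i of the matrix (missing entries count as 0)
def colSum (matrix : List (List Int)) (i : Nat) : Int :=
  (matrix.map (fun row => row.getD i 0)).sum

-- pointwise addition of a (shorter) row into the count table
def addRow (counts row : List Int) : List Int :=
  match counts, row with
  | counts, [] => counts
  | c :: cs, v :: vs => (c + v) :: addRow cs vs
  | [], _ :: _ => []

theorem aScanCol_eq (matrix : List (List Int)) (i : Nat) :
    aScanCol matrix i =
      if ∀ row ∈ matrix, row.getD i 0 = 0 ∨ row.getD i 0 = 1
      then some (colSum matrix i) else none := by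
  induction matrix with
  | nil => simp [aScanCol, colSum]
  | cons row rest ih =>
    by_cases hr : ∀ r ∈ rest, r.getD i 0 = 0 ∨ r.getD i 0 = 1
    all_goals simp only [List.getD_eq_getElem?_getD] at hr
    all_goals by_cases h : i < row.length
    · have hg : row[i]?.getD 0 = row[i] := by simp [List.getElem?_eq_getElem h]
      by_cases h1 : row[i] = (1 : Int)
      · simp [aScanCol, h, h1, ih, hr, List.forall_mem_cons, hg, colSum]
        rw [if_pos hr, if_pos hr]
        congr 1
        omega
      · by_cases h0 : row[i] = (0 : Int)
        · simp [aScanCol, h, h1, h0, ih, hr, List.forall_mem_cons, hg, colSum]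
        · simp [aScanCol, h, h1, h0, List.forall_mem_cons, hg]
    · have hg : row[i]?.getD 0 = 0 := by
        rw [List.getElem?_eq_none (by omega)]; rfl
      simp [aScanCol, h, ih, hr, List.forall_mem_cons, hg, colSum]
    · have hg : row[i]?.getD 0 = row[i] := by simp [List.getElem?_eq_getElem h]
      by_cases h1 : row[i] = (1 : Int)
      · simp [aScanCol, h, h1, ih, hr, List.forall_mem_cons, hg]
      · by_cases h0 : row[i] = (0 : Int)
        · simp [aScanCol, h, h1, h0, ih, hr, List.forall_mem_cons, hg]
        · simp [aScanCol, h, h1, h0, List.forall_mem_cons, hg]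
    · have hg : row[i]?.getD 0 = 0 := by
        rw [List.getElem?_eq_none (by omega)]; rfl
      simp [aScanCol, h, ih, hr, List.forall_mem_cons, hg]

theorem aOuter_true_iff (matrix : List (List Int)) (n i : Nat) :
    aOuter matrix i n = true ↔ ∀ k < n, aScanCol matrix (i + k) = some 2 := by
  induction n generalizing i with
  | zero => simp [aOuter]
  | succ n ih =>
    simp only [aOuter]
    cases hs : aScanCol matrix i with
    | none =>
      simp only [Bool.false_eq_true, false_iff]
      intro hall
      have := hall 0 (by omega)
      simp [hs] at this
    | some c =>
      by_cases hc : c = 2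
      · subst hc
        simp only [ne_eq, not_true_eq_false, if_neg, ih, reduceIte]
        constructor
        · intro hall k hk
          cases k with
          | zero => simpa using hs
          | succ k =>
            have := hall k (by omega)
            simpa [Nat.add_assoc, Nat.add_comm 1 k] using this
        · intro hall k hk
          have := hall (k + 1) (by omega)
          simpa [Nat.add_assoc, Nat.add_comm 1 k] using this
      · simp only [if_pos hc, Bool.false_eq_true, false_iff]
        intro hall
        have := hall 0 (by omega)
        simp [hs] at this
        exact hc this

theorem addRow_length (counts row : List Int) (h : row.length ≤ counts.length) :
    (addRow counts row).length = counts.length := by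
  induction row generalizing counts with
  | nil => cases counts <;> simp [addRow]
  | cons v vs ih =>
    cases counts with
    | nil => simp at h
    | cons c cs => simp [addRow, ih cs (by simpa using h)]

theorem addRow_getD (counts row : List Int) (i : Nat) (h : row.length ≤ counts.length) :
    (addRow counts row).getD i 0 = counts.getD i 0 + row.getD i 0 := by
  induction row generalizing counts i with
  | nil => cases counts <;> simp [addRow]
  | cons v vs ih =>
    cases counts with
    | nil => simp at h
    | cons c cs =>
      cases i with
      | zero => simp [addRow]
      | succ i => simpa [addRow] using ih cs i (by simpa using h)

theorem bRow_eq (counts row : List Int) :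
    bRow counts row =
      if (∀ v ∈ row, v = 0 ∨ v = 1) ∧ row.length ≤ counts.length
      then some (addRow counts row) else none := by
  induction row generalizing counts with
  | nil => simp [bRow, addRow]
  | cons v vs ih =>
    by_cases hv : v = 0 ∨ v = 1
    · cases counts with
      | nil =>
        have : ¬(v ≠ 0 ∧ v ≠ 1) := by tauto
        simp [bRow, this]
      | cons c cs =>
        have : ¬(v ≠ 0 ∧ v ≠ 1) := by tauto
        simp only [bRow, if_neg this, ih cs, List.forall_mem_cons]
        by_cases hrest : (∀ x ∈ vs, x = 0 ∨ x = 1) ∧ vs.length ≤ cs.length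
        · rw [if_pos hrest, if_pos ⟨⟨hv, hrest.1⟩, by simp; omega⟩]
          simp [addRow]
        · rw [if_neg hrest, if_neg (fun hx => hrest ⟨hx.1.2, Nat.le_of_succ_le_succ hx.2⟩)]
          rfl
    · have : v ≠ 0 ∧ v ≠ 1 := by tauto
      rw [if_neg (by intro hx; exact hv (hx.1 v (by simp)))]
      unfold bRow
      rw [if_pos this]

theorem bAll_eq (matrix : List (List Int)) (counts : List Int)
    (hlen : ∀ row ∈ matrix, row.length ≤ counts.length) :
    bAll matrix counts =
      if ∀ row ∈ matrix, ∀ v ∈ row, v = 0 ∨ v = 1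
      then some (matrix.foldl addRow counts) else none := by
  induction matrix generalizing counts with
  | nil => simp [bAll]
  | cons row rest ih =>
    have h1 : row.length ≤ counts.length := hlen row (by simp)
    simp only [bAll, bRow_eq, List.forall_mem_cons]
    by_cases hrow : ∀ v ∈ row, v = 0 ∨ v = 1
    · rw [if_pos ⟨hrow, h1⟩]
      have hlen' : ∀ r ∈ rest, r.length ≤ (addRow counts row).length := by
        rw [addRow_length counts row h1]
        exact fun r hr => hlen r (by simp [hr])
      rw [List.foldl_cons, Option.bind_some, ih (addRow counts row) hlen']
      by_cases hrest : ∀ r ∈ rest, ∀ v ∈ r, v = 0 ∨ v = 1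
      · rw [if_pos hrest, if_pos ⟨hrow, hrest⟩]
      · rw [if_neg hrest, if_neg (by tauto)]
    · rw [if_neg (by tauto), if_neg (by tauto)]
      rfl

theorem foldl_addRow_length (matrix : List (List Int)) (counts : List Int)
    (hlen : ∀ row ∈ matrix, row.length ≤ counts.length) :
    (matrix.foldl addRow counts).length = counts.length := by
  induction matrix generalizing counts with
  | nil => rfl
  | cons row rest ih =>
    have h1 : row.length ≤ counts.length := hlen row (by simp)
    rw [List.foldl_cons, ih (addRow counts row)
      (by rw [addRow_length counts row h1]; exact fun r hr => hlen r (by simp [hr])),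
      addRow_length counts row h1]

theorem foldl_addRow_getD (matrix : List (List Int)) (counts : List Int) (i : Nat)
    (hlen : ∀ row ∈ matrix, row.length ≤ counts.length) :
    (matrix.foldl addRow counts).getD i 0 = counts.getD i 0 + colSum matrix i := by
  induction matrix generalizing counts with
  | nil => simp [colSum]
  | cons row rest ih =>
    have h1 : row.length ≤ counts.length := hlen row (by simp)
    rw [List.foldl_cons, ih (addRow counts row)
      (by rw [addRow_length counts row h1]; exact fun r hr => hlen r (by simp [hr])),
      addRow_getD counts row i h1]
    simp [colSum]
    omega

theorem le_maxGetD (l : List Nat) (x : Nat) (h : x ∈ l) : x ≤ l.max?.getD 0 := by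
  induction l with
  | nil => simp at h
  | cons a l ih =>
    rcases List.mem_cons.mp h with h | h
    · subst h
      cases hl : l.max? with
      | none => simp [List.max?_cons, hl]
      | some m => simp [List.max?_cons, hl]
    · have hx := ih h
      cases hl : l.max? with
      | none => simp [hl] at hx; omega
      | some m =>
        simp [hl] at hx
        simp [List.max?_cons, hl]
        omega

-- ===== VERDICT (by name: the statement is the Claim_ definition above) =====
theorem checkMatrixColumns_spec : Claim_equal_checkMatrixColumns := by
  intro matrix _ _
  show checkMatrixColumns matrix = checkMatrixColumns_alt matrix
  unfold checkMatrixColumns checkMatrixColumns_alt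
  set N := (matrix.map List.length).max?.getD 0 with hN
  show aOuter matrix 0 N =
    (match bAll matrix (List.replicate N (0 : Int)) with
     | none => false
     | some counts => counts.all fun c => c == 2)
  have hlen : ∀ row ∈ matrix, row.length ≤ N :=
    fun row hr => le_maxGetD _ _ (List.mem_map_of_mem hr)
  have hlenrep : ∀ row ∈ matrix, row.length ≤ (List.replicate N (0 : Int)).length := by
    simpa using hlen
  rw [bAll_eq matrix _ hlenrep]
  by_cases P : ∀ row ∈ matrix, ∀ v ∈ row, v = 0 ∨ v = 1
  · rw [if_pos P]
    set R := matrix.foldl addRow (List.replicate N (0 : Int)) with hR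
    have hRlen : R.length = N := by simpa using foldl_addRow_length matrix _ hlenrep
    have hRg : ∀ i : Nat, R.getD i 0 = colSum matrix i := by
      intro i
      have h := foldl_addRow_getD matrix (List.replicate N (0 : Int)) i hlenrep
      rw [← hR] at h
      simpa using h
    have hScan : ∀ i : Nat, aScanCol matrix i = some (colSum matrix i) := by
      intro i
      rw [aScanCol_eq, if_pos]
      intro row hr
      by_cases hi : i < row.length
      · rw [List.getD_eq_getElem row 0 hi]
        exact P row hr _ (List.getElem_mem hi)
      · rw [List.getD_eq_default row 0 (by omega)]
        left; rfl
    have hB : (R.all (fun c => c == 2) = true) ↔ ∀ i < N, colSum matrix i = 2 := by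
      rw [List.all_eq_true]
      constructor
      · intro h i hi
        have hiR : i < R.length := by omega
        have h2 := h R[i] (List.getElem_mem hiR)
        rw [beq_iff_eq] at h2
        rw [← h2, ← hRg i, List.getD_eq_getElem R 0 hiR]
      · intro h c hc
        obtain ⟨i, hi, rfl⟩ := List.mem_iff_getElem.mp hc
        have h2 : R.getD i 0 = colSum matrix i := hRg i
        rw [List.getD_eq_getElem R 0 hi] at h2
        rw [beq_iff_eq, h2]
        exact h i (by omega)
    have key : (aOuter matrix 0 N = true) ↔ (R.all (fun c => c == 2) = true) := by
      rw [aOuter_true_iff, hB]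
      constructor
      · intro h i hi
        have h2 := h i hi
        rw [Nat.zero_add, hScan i] at h2
        exact Option.some.inj h2
      · intro h k hk
        rw [Nat.zero_add, hScan k, h k hk]
    cases h1 : aOuter matrix 0 N <;> cases h2 : R.all (fun c => c == 2) <;> simp_all
  · rw [if_neg P]
    show aOuter matrix 0 N = false
    cases h : aOuter matrix 0 N
    · rfl
    · exfalso
      push_neg at P
      obtain ⟨row, hr, v, hv, hv0, hv1⟩ := P
      obtain ⟨k, hk, hvk⟩ := List.mem_iff_getElem.mp hv
      have hkN : k < N := lt_of_lt_of_le hk (hlen row hr)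
      have h2 := (aOuter_true_iff matrix N 0).mp h k hkN
      rw [Nat.zero_add, aScanCol_eq, if_neg] at h2
      · simp at h2
      · intro hall
        have h3 := hall row hr
        rw [List.getD_eq_getElem row 0 hk, hvk] at h3
        rcases h3 with h3 | h3
        · exact hv0 h3
        · exact hv1 h3
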